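-- pv_equiv track=rewrite | github.com/k-sriram/advent-of-code | 2024/day09.py | get_first_block
-- ===== SOURCE A (Python) =====
-- def get_first_block(disk: list[int | None], size: int) -> int | None:
--     in_empty = False
--     cur_id = None
--     L = 0
--     for i, c in enumerate(disk):
--         if c is None:
--             if in_empty:
--                 L += 1
--             else:
--                 cur_id = i
--                 L = 1
--                 in_empty = True
--             if L >= size:
--                 return cur_id
--         else:
--             in_empty = False
--     return None
-- ===== SOURCE B (Python) =====
-- def get_first_block(disk, size):
--     i, n = 0, len(disk)
--     while i < n:
--         if disk[i] is None:
--             j = i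
--             while j < n and disk[j] is None:
--                 j += 1
--             if j - i >= size:
--                 return i
--             i = j
--         else:
--             i += 1
--     return None
-- ===== Notes on version B (the rewrite author's own statement) =====
-- stated objective: alternative
-- what changed: Replaced A's per-element state machine (in_empty/cur_id/L flags) with a two-pointer scan that jumps over each maximal None-run at once and tests its length directly.
import Mathlib
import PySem

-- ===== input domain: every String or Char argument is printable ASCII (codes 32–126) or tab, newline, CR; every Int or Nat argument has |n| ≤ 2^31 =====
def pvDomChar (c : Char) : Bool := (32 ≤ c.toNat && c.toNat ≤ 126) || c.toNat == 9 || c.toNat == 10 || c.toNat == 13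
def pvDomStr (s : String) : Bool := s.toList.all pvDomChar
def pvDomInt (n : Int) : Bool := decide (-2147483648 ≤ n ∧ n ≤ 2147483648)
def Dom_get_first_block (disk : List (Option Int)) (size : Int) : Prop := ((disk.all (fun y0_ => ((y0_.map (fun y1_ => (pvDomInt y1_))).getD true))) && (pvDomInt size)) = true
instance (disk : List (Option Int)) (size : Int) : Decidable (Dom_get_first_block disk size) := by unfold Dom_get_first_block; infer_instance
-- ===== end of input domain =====

-- ===== PORT A =====
-- A: per-element scan with state (in_empty, cur_id, L); early return when L >= size.
def goA_get_first_block (size : Int) : List (Option Int) → Int → Bool → Option Int → Int → Option Int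
  | [], _, _, _, _ => none
  | c :: rest, i, in_empty, cur_id, L =>
    match c with
    | none =>
      let cur_id' := if in_empty then cur_id else some i
      let L' := if in_empty then L + 1 else 1
      if L' ≥ size then cur_id' else goA_get_first_block size rest (i + 1) true cur_id' L'
    | some _ => goA_get_first_block size rest (i + 1) false cur_id L

def get_first_block (disk : List (Option Int)) (size : Int) : Option Int :=
  goA_get_first_block size disk 0 false none 0

-- ===== PORT B =====
-- B: length of the leading run of None (the inner while loop of Source B).
def runLen_get_first_block : List (Option Int) → Nat
  | none :: r => runLen_get_first_block r + 1
  | _ => 0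

-- B: outer loop — jump over each maximal None-run, testing its length.
def goB_get_first_block (size : Int) : List (Option Int) → Int → Option Int
  | [], _ => none
  | none :: r, i =>
      let k := runLen_get_first_block (none :: r)
      if (k : Int) ≥ size then some i
      else goB_get_first_block size ((none :: r).drop k) (i + (k : Int))
  | some _ :: r, i => goB_get_first_block size r (i + 1)
  termination_by l _ => l.length
  decreasing_by
  all_goals simp [runLen_get_first_block, List.length_drop]

def get_first_block_alt (disk : List (Option Int)) (size : Int) : Option Int :=
  goB_get_first_block size disk 0

-- B differs only in decomposition; both are one linear pass. One honest line: B finds each maximal None-run with a nested skip loop instead of A's boolean state machine.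

-- ===== PRECONDITION & SPEC =====
def Spec_get_first_block (disk : List (Option Int)) (size : Int) (out : Option Int) : Prop := out = get_first_block_alt disk size
instance (disk : List (Option Int)) (size : Int) (out : Option Int) : Decidable (Spec_get_first_block disk size out) := by unfold Spec_get_first_block; infer_instance

-- ===== CLAIM (what is proved, stated in full; the proofs are below) =====
def Claim_equal_get_first_block : Prop := ∀ (disk : List (Option Int)) (size : Int), Dom_get_first_block disk size → Spec_get_first_block disk size (get_first_block disk size)

-- ===== LEMMAS AND PROOFS =====

lemma goA_false_state (size : Int) (l : List (Option Int)) :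
    ∀ (i : Int) (c c' : Option Int) (L L' : Int),
    goA_get_first_block size l i false c L = goA_get_first_block size l i false c' L' := by
  induction l with
  | nil => intros; rfl
  | cons hd tl ih =>
    intro i c c' L L'
    cases hd with
    | none => simp only [goA_get_first_block, Bool.false_eq_true, reduceIte]
    | some x => simp only [goA_get_first_block]; exact ih _ _ _ _ _

lemma goA_true_run (size : Int) (l : List (Option Int)) :
    ∀ (i : Int) (cur : Option Int) (L : Int), L < size →
    goA_get_first_block size l i true cur L =
      if size ≤ L + (runLen_get_first_block l : Int) then cur
      else goA_get_first_block size (l.drop (runLen_get_first_block l))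
             (i + (runLen_get_first_block l : Int)) false none 0 := by
  induction l with
  | nil =>
    intro i cur L hL
    simp only [runLen_get_first_block, goA_get_first_block, List.drop_nil,
      Nat.cast_zero, add_zero]
    rw [if_neg (by omega)]
  | cons hd tl ih =>
    intro i cur L hL
    cases hd with
    | none =>
      simp only [goA_get_first_block, runLen_get_first_block, reduceIte]
      by_cases h1 : L + 1 ≥ size
      · rw [if_pos h1, if_pos (by push_cast; omega)]
      · rw [if_neg h1, ih (i + 1) cur (L + 1) (by omega)]
        by_cases h2 : size ≤ L + 1 + (runLen_get_first_block tl : Int)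
        · rw [if_pos h2, if_pos (by push_cast at h2 ⊢; omega)]
        · rw [if_neg h2, if_neg (by push_cast at h2 ⊢; omega)]
          have hi : (i + 1 + (runLen_get_first_block tl : Int)) =
              (i + ((runLen_get_first_block tl + 1 : Nat) : Int)) := by push_cast; ring
          rw [hi, List.drop_succ_cons]
    | some x =>
      simp only [goA_get_first_block, runLen_get_first_block, Nat.cast_zero,
        add_zero, List.drop_zero]
      rw [if_neg (by omega)]
      exact goA_false_state size tl (i + 1) cur none L 0

lemma go_main (size : Int) : ∀ (n : Nat) (l : List (Option Int)), l.length ≤ n →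
    ∀ (i : Int) (c : Option Int) (L : Int),
    goA_get_first_block size l i false c L = goB_get_first_block size l i := by
  intro n
  induction n with
  | zero =>
    intro l hl i c L
    have : l = [] := List.eq_nil_of_length_eq_zero (by omega)
    subst this
    simp [goA_get_first_block, goB_get_first_block]
  | succ m ih =>
    intro l hl i c L
    cases l with
    | nil => simp [goA_get_first_block, goB_get_first_block]
    | cons hd tl =>
      cases hd with
      | some x =>
        simp only [goA_get_first_block, goB_get_first_block]
        exact ih tl (by simp at hl; omega) (i + 1) c L
      | none =>
        simp only [goA_get_first_block, goB_get_first_block, runLen_get_first_block,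
          Bool.false_eq_true, reduceIte]
        by_cases h1 : (1 : Int) ≥ size
        · rw [if_pos h1, if_pos (by push_cast; omega)]
        · rw [if_neg h1, goA_true_run size tl (i + 1) (some i) 1 (by omega)]
          by_cases h2 : size ≤ 1 + (runLen_get_first_block tl : Int)
          · rw [if_pos h2, if_pos (by push_cast; omega)]
          · rw [if_neg h2, if_neg (by push_cast at h2 ⊢; omega)]
            have hlen : (tl.drop (runLen_get_first_block tl)).length ≤ m := by
              simp only [List.length_drop]
              simp at hl; omega
            rw [ih _ hlen]
            have hi : (i + 1 + (runLen_get_first_block tl : Int)) =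
                (i + ((runLen_get_first_block tl + 1 : Nat) : Int)) := by push_cast; ring
            rw [hi, List.drop_succ_cons]

-- ===== VERDICT (by name: the statement is the Claim_ definition above) =====
theorem get_first_block_spec : Claim_equal_get_first_block := by
  intro disk size _
  unfold Spec_get_first_block get_first_block get_first_block_alt
  exact go_main size disk.length disk le_rfl 0 none 0
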